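-- pv_equiv track=rewrite | github.com/Ai4dse/auto-question-tool | backend/app/question_types/relational_algebra_helper.py | get_matching_open_paren
-- ===== SOURCE A (Python) =====
-- def get_matching_open_paren(s):
--     balance = 0
--     for i in range(len(s) - 1, -1, -1):
--         if s[i] == ')':
--             balance += 1
--         elif s[i] == '(':
--             balance -= 1
--         if balance < 0: # stop when more '(' than ')'
--             return s[i+1:] # ( Vorlesungen --> returns Vorlesungen
--     return s
-- ===== SOURCE B (Python) =====
-- def get_matching_open_paren(s):
--     stack = []
--     for i, c in enumerate(s):
--         if c == '(':
--             stack.append(i)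
--         elif c == ')' and stack:
--             stack.pop()
--     if not stack:
--         return s
--     return s[stack[-1] + 1:]
-- ===== Notes on version B (the rewrite author's own statement) =====
-- stated objective: alternative
-- what changed: Replaces A's backward scan with a balance counter (early return when it first goes negative) by a single forward pass maintaining a stack of open-paren indices; the last surviving stack entry is the rightmost unmatched '(' and the answer is the suffix after it.
import Mathlib
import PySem

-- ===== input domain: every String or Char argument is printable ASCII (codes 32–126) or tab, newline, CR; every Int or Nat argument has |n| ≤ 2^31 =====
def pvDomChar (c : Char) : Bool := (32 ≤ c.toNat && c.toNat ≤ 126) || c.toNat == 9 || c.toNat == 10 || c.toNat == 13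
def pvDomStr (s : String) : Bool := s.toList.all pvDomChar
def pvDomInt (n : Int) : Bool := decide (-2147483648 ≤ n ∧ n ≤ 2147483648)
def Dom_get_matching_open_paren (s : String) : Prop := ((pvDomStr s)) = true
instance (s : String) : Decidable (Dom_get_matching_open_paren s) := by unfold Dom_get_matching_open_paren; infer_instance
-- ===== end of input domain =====

-- B replaces A's right-to-left balance-counter scan by a forward pass with a stack of
-- open-paren indices (objective: alternative decomposition, same O(n) cost).

-- ===== PORT A =====
-- A's loop: for i in range(len(s)-1, -1, -1) with a balance counter and early return.
def pvLoopA (s : String) : List Int → Int → String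
  | [], _ => s
  | i :: rest, balance =>
    let balance :=
      if PySem.Str.pyGet? s i = some ')' then balance + 1
      else if PySem.Str.pyGet? s i = some '(' then balance - 1
      else balance
    if balance < 0 then PySem.Str.slice s (some (i + 1)) none
    else pvLoopA s rest balance

def get_matching_open_paren (s : String) : String :=
  pvLoopA s (PySem.List.pyRange ((PySem.Str.len s : Int) - 1) (-1) (-1)) 0

-- ===== PORT B =====
-- B's stack is kept most-recent-first: Lean's head is Python's stack[-1],
-- push is cons, pop is tail (pop on an empty stack never happens: B guards it,
-- and tail [] = [] makes the transcription total).
def pvStepB (st : List Int) (ic : Int × Char) : List Int :=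
  if ic.2 = '(' then ic.1 :: st
  else if ic.2 = ')' then st.tail
  else st

def get_matching_open_paren_alt (s : String) : String :=
  let stack := (PySem.List.enumerate s.toList 0).foldl pvStepB []
  match stack with
  | [] => s
  | j :: _ => PySem.Str.slice s (some (j + 1)) none

-- ===== PRECONDITION & SPEC =====
def Spec_get_matching_open_paren (s : String) (out : String) : Prop := out = get_matching_open_paren_alt s
instance (s : String) (out : String) : Decidable (Spec_get_matching_open_paren s out) := by unfold Spec_get_matching_open_paren; infer_instance

-- ===== CLAIM (what is proved, stated in full; the proofs are below) =====
def Claim_equal_get_matching_open_paren : Prop := ∀ (s : String), Dom_get_matching_open_paren s → Spec_get_matching_open_paren s (get_matching_open_paren s)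

-- ===== LEMMAS AND PROOFS =====

-- the contribution of one character to A's balance
def pvDelta (c : Char) : Int := if c = ')' then 1 else if c = '(' then -1 else 0

-- model of A's scan: process the reversed character list with a running balance,
-- returning the original index (= length of the remaining reversed tail) where the
-- balance first goes negative
def pvModel : List Char → Int → Option Int
  | [], _ => none
  | c :: r, b =>
    let b' := b + pvDelta c
    if b' < 0 then some (r.length : Int) else pvModel r b'

def pvStackOf (t : List Char) : List Int := (PySem.List.enumerate t 0).foldl pvStepB []

theorem pv_enumerate_append (t : List Char) (c : Char) (s0 : Int) :
    PySem.List.enumerate (t ++ [c]) s0 = PySem.List.enumerate t s0 ++ [(s0 + (t.length : Int), c)] := by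
  induction t generalizing s0 with
  | nil => simp [PySem.List.enumerate_cons]
  | cons x xs ih =>
    simp [PySem.List.enumerate_cons, ih]
    omega

theorem pv_stackOf_append (t : List Char) (c : Char) :
    pvStackOf (t ++ [c]) = pvStepB (pvStackOf t) ((t.length : Int), c) := by
  simp [pvStackOf, pv_enumerate_append]

-- the bridge between the two scans: A's model with initial balance b over the
-- reversed string returns exactly the b-th entry (from the top) of B's stack
theorem pv_model_eq_stack (t : List Char) : ∀ (b : Nat),
    pvModel t.reverse (b : Int) = (pvStackOf t)[b]? := by
  induction t using List.reverseRecOn with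
  | nil => intro b; simp [pvModel, pvStackOf, PySem.List.enumerate]
  | append_singleton t c ih =>
    intro b
    rw [pv_stackOf_append]
    rw [List.reverse_append, List.reverse_singleton, List.singleton_append]
    by_cases hop : c = '('
    · subst hop
      rw [show pvStepB (pvStackOf t) ((t.length : Int), '(') = (t.length : Int) :: pvStackOf t
            from rfl]
      simp only [pvModel]
      rw [show pvDelta '(' = (-1 : Int) from rfl]
      by_cases hb : b = 0
      · subst hb
        rw [if_pos (by omega : ((0 : Nat) : Int) + (-1) < 0)]
        simp
      · rw [if_neg (by omega : ¬ ((b : Int) + (-1) < 0))]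
        rw [show (b : Int) + (-1) = ((b - 1 : Nat) : Int) by omega, ih (b - 1)]
        rcases b with _ | b'
        · exact absurd rfl hb
        · simp
    · by_cases hcl : c = ')'
      · subst hcl
        rw [show pvStepB (pvStackOf t) ((t.length : Int), ')') = (pvStackOf t).tail from rfl]
        simp only [pvModel]
        rw [show pvDelta ')' = (1 : Int) from rfl]
        rw [if_neg (by omega : ¬ ((b : Int) + 1 < 0))]
        rw [show (b : Int) + 1 = ((b + 1 : Nat) : Int) by omega, ih (b + 1)]
        rcases pvStackOf t with _ | ⟨x, st⟩ <;> simp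
      · rw [show pvStepB (pvStackOf t) ((t.length : Int), c) = pvStackOf t from by
              simp [pvStepB, hop, hcl]]
        simp only [pvModel]
        rw [show pvDelta c = (0 : Int) from by simp [pvDelta, hop, hcl]]
        rw [if_neg (by omega : ¬ ((b : Int) + 0 < 0))]
        rw [show (b : Int) + 0 = (b : Int) by omega, ih b]

-- A's loop over range(k-1, -1, -1) equals the model on the reversed k-prefix
theorem pv_loopA_eq_model (s : String) : ∀ (k : Nat), k ≤ s.toList.length → ∀ (b : Int),
    pvLoopA s (PySem.List.pyRange ((k : Int) - 1) (-1) (-1)) b =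
      (match pvModel (s.toList.take k).reverse b with
       | some i => PySem.Str.slice s (some (i + 1)) none
       | none => s) := by
  intro k
  induction k with
  | zero =>
    intro _ b
    rw [PySem.List.pyRange_neg_one_eq_nil (by omega)]
    simp [pvLoopA, pvModel]
  | succ k ih =>
    intro hk b
    have hk' : k < s.toList.length := by omega
    have hcast : ((k + 1 : Nat) : Int) - 1 = (k : Int) := by omega
    rw [hcast, PySem.List.pyRange_neg_one_cons (by omega)]
    have hget : PySem.Str.pyGet? s (k : Int) = some (s.toList[k]) := by
      simp [List.getElem?_eq_getElem hk']
    have htake : (s.toList.take (k + 1)).reverse = s.toList[k] :: (s.toList.take k).reverse := by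
      rw [List.take_add_one, List.getElem?_eq_getElem hk']
      simp
    rw [htake]
    simp only [pvLoopA, pvModel, hget, Option.some.injEq]
    have hb' : (if s.toList[k] = ')' then b + 1 else if s.toList[k] = '(' then b - 1 else b)
        = b + pvDelta s.toList[k] := by
      unfold pvDelta; split_ifs <;> omega
    rw [hb']
    by_cases hneg : b + pvDelta s.toList[k] < 0
    · rw [if_pos hneg, if_pos hneg]
      have hlen2 : (((s.toList.take k).reverse.length : Nat) : Int) = (k : Int) := by
        rw [List.length_reverse, List.length_take]
        omega
      rw [hlen2]
    · rw [if_neg hneg, if_neg hneg]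
      have h1 : (k : Int) - 1 + 1 = (k : Int) := by omega
      have := ih (by omega) (b + pvDelta s.toList[k])
      rw [hcast] at *
      exact this

-- ===== VERDICT (by name: the statement is the Claim_ definition above) =====
theorem get_matching_open_paren_spec : Claim_equal_get_matching_open_paren := by
  intro s _
  unfold Spec_get_matching_open_paren get_matching_open_paren get_matching_open_paren_alt
  have hlen : PySem.Str.len s = s.toList.length := by simp [PySem.Str.len_eq]
  rw [hlen]
  have h := pv_loopA_eq_model s s.toList.length le_rfl 0
  rw [List.take_length] at h
  rw [h]
  have hm : pvModel s.toList.reverse 0 = (pvStackOf s.toList)[0]? := by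
    have := pv_model_eq_stack s.toList 0
    simpa using this
  rw [hm]
  show _ = (match (PySem.List.enumerate s.toList 0).foldl pvStepB [] with
            | [] => s
            | j :: _ => PySem.Str.slice s (some (j + 1)) none)
  rcases hst : pvStackOf s.toList with _ | ⟨j, st⟩ <;>
    simp [pvStackOf] at hst <;> rw [hst] <;> simp
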